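-- pv_equiv track=rewrite | github.com/MrBrantCode/unitest_baseline | mut_generate/mist_train_cf/cf_52723/solution.py | segregate_and_sort
-- ===== SOURCE A (Python) =====
-- def segregate_and_sort(arr):
--     even_numbers = []
--     odd_numbers = []
--     prime_numbers = []
--
--     # function to check prime numbers
--     def check_prime(num):
--         if num <= 1 :
--             return False
--         else :
--             for i in range(2,num):
--                 if num % i == 0:
--                     return False
--
--             return True
--
--     # partition the list into even, odd and prime number lists
--     for num in arr:
--         if num % 2 == 0:
--             even_numbers.append(num)
--
--             # 2 is the only even prime number
--             if num == 2:
--                 prime_numbers.append(num)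
--         else:
--             odd_numbers.append(num)
--             if check_prime(num):
--                 prime_numbers.append(num)
--
--     # custom Bubble sort implementation
--     def bubble_sort(lst):
--         for i in range(len(lst)):
--             for j in range(len(lst) - 1):
--                 if lst[j] > lst[j + 1]:
--                     lst[j], lst[j + 1] = lst[j + 1], lst[j]
--         return lst
--
--     # sort all the lists
--     even_numbers = bubble_sort(even_numbers)
--     odd_numbers = bubble_sort(odd_numbers)
--     prime_numbers = bubble_sort(prime_numbers)
--
--     return even_numbers, odd_numbers, prime_numbers
-- ===== SOURCE B (Python) =====
-- def segregate_and_sort(arr):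
--     # same primality check as the original
--     def check_prime(num):
--         if num <= 1:
--             return False
--         for i in range(2, num):
--             if num % i == 0:
--                 return False
--         return True
--
--     # sort once; three filters of an ascending list are already sorted.
--     # check_prime alone characterises A's prime list: check_prime(2) is True
--     # and check_prime of any even number > 2 is False.
--     srt = sorted(arr)
--     even_numbers = [x for x in srt if x % 2 == 0]
--     odd_numbers = [x for x in srt if x % 2 != 0]
--     prime_numbers = [x for x in srt if check_prime(x)]
--     return even_numbers, odd_numbers, prime_numbers
-- ===== Notes on version B (the rewrite author's own statement) =====
-- stated objective: faster
-- what changed: B sorts the input once and returns three filter comprehensions of the sorted copy (primes selected by check_prime alone, which coincides with A's even==2/odd-check rule), replacing A's single partition loop followed by three O(n^2) bubble sorts.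
import Mathlib
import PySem

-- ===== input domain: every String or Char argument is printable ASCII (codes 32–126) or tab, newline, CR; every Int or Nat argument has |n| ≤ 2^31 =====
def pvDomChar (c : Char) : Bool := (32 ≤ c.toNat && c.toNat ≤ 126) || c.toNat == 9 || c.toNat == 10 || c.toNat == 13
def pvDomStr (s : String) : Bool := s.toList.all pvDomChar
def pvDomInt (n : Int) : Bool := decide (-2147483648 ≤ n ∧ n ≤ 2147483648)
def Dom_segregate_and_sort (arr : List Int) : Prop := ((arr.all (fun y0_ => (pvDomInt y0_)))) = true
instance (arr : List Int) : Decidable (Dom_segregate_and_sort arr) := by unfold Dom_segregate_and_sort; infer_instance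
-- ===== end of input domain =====

-- B sorts the input once and returns three filters of the sorted copy (each already sorted),
-- replacing A's partition loop plus three quadratic bubble sorts; objective: faster sorting.

-- ===== PORT A =====
-- check_prime: trial division over range(2, num)
def pvCheckPrime (num : Int) : Bool :=
  if num ≤ 1 then false
  else (PySem.List.pyRange 2 num 1).all (fun i => !(PySem.Int.mod num i == 0))

-- body of A's partition loop: append num to even/odd, and maybe to prime
def pvLoopBody (acc : List Int × List Int × List Int) (num : Int) :
    List Int × List Int × List Int :=
  if PySem.Int.mod num 2 == 0 then
    (acc.1 ++ [num], acc.2.1, if num == 2 then acc.2.2 ++ [num] else acc.2.2)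
  else
    (acc.1, acc.2.1 ++ [num], if pvCheckPrime num then acc.2.2 ++ [num] else acc.2.2)

-- inner body of bubble_sort: compare lst[j] and lst[j+1], swap if out of order
def pvBubbleStep (lst : List Int) (j : Int) : List Int :=
  let a := PySem.List.pyGetD lst j 0
  let b := PySem.List.pyGetD lst (j + 1) 0
  if a > b then PySem.List.pySetD (PySem.List.pySetD lst j b) (j + 1) a else lst

-- one pass: for j in range(len(lst) - 1)
def pvBubblePass (lst : List Int) : List Int :=
  (PySem.List.pyRange 0 (PySem.List.len lst - 1) 1).foldl pvBubbleStep lst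

-- for i in range(len(lst)): one pass each
def pvBubbleSort (lst : List Int) : List Int :=
  (PySem.List.pyRange 0 (PySem.List.len lst) 1).foldl (fun cur _ => pvBubblePass cur) lst

def segregate_and_sort (arr : List Int) : List Int × List Int × List Int :=
  let part := arr.foldl pvLoopBody ([], [], [])
  (pvBubbleSort part.1, pvBubbleSort part.2.1, pvBubbleSort part.2.2)

-- ===== PORT B =====
-- B's check_prime: the 'for i in range(2, num)' loop with its early 'return False',
-- transliterated as a recursion on i (stops at the first divisor)
def pvCheckPrimeLoop (num i : Int) : Bool :=
  if i < num then
    if PySem.Int.mod num i == 0 then false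
    else pvCheckPrimeLoop num (i + 1)
  else true
termination_by (num - i).toNat
decreasing_by omega

def pvCheckPrimeB (num : Int) : Bool :=
  if num ≤ 1 then false else pvCheckPrimeLoop num 2

-- sorted(arr) once, then three filter comprehensions of the sorted copy
def segregate_and_sort_alt (arr : List Int) : List Int × List Int × List Int :=
  let srt := PySem.List.sorted arr (fun x => x) false
  (srt.filter (fun x => PySem.Int.mod x 2 == 0),
   srt.filter (fun x => !(PySem.Int.mod x 2 == 0)),
   srt.filter (fun x => pvCheckPrimeB x))

-- ===== PRECONDITION & SPEC =====
def Spec_segregate_and_sort (arr : List Int) (out : List Int × List Int × List Int) : Prop := out = segregate_and_sort_alt arr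
instance (arr : List Int) (out : List Int × List Int × List Int) : Decidable (Spec_segregate_and_sort arr out) := by unfold Spec_segregate_and_sort; infer_instance

-- ===== CLAIM (what is proved, stated in full; the proofs are below) =====
def Claim_equal_segregate_and_sort : Prop := ∀ (arr : List Int), Dom_segregate_and_sort arr → Spec_segregate_and_sort arr (segregate_and_sort arr)

-- ===== LEMMAS AND PROOFS =====

-- structural description of one bubble pass: carry the larger element rightwards
def bpass : List Int → List Int
  | [] => []
  | [a] => [a]
  | a :: b :: t => if b < a then b :: bpass (a :: t) else a :: bpass (b :: t)
termination_by l => l.length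
decreasing_by all_goals simp

theorem bpass_perm : ∀ l : List Int, (bpass l).Perm l := by
  intro l
  induction l using bpass.induct with
  | case1 => simp [bpass]
  | case2 a => simp [bpass]
  | case3 a b t h ih =>
      simp only [bpass, if_pos h]
      exact ((ih.cons b).trans (List.Perm.swap a b t)).symm.symm
  | case4 a b t h ih =>
      simp only [bpass, if_neg h]
      exact ih.cons a

theorem bpass_ne_nil : ∀ (l : List Int), l ≠ [] → bpass l ≠ [] := by
  intro l h
  have := bpass_perm l
  intro hn
  rw [hn] at this
  exact h this.symm.eq_nil

-- bpass of a nonempty list, extended by one element on the right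
theorem bpass_snoc : ∀ (xs : List Int) (c : Int) (zs : List Int) (m : Int),
    bpass xs = zs ++ [m] →
    bpass (xs ++ [c]) = if c < m then zs ++ [c, m] else zs ++ [m, c] := by
  intro xs
  induction xs using bpass.induct with
  | case1 => intro c zs m h; simp [bpass] at h
  | case2 a =>
      intro c zs m h
      simp [bpass] at h
      obtain ⟨rfl, rfl⟩ : zs = [] ∧ a = m := by
        cases zs with
        | nil => simpa using h
        | cons z t => simp at h
      simp [bpass]
  | case3 a b t h ih =>
      intro c zs m hx
      simp only [bpass, if_pos h] at hx
      have hne : bpass (a :: t) ≠ [] := bpass_ne_nil _ (by simp)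
      cases zs with
      | nil =>
          simp at hx
          exact absurd hx.2 hne
      | cons z zs' =>
          simp at hx
          obtain ⟨rfl, hx2⟩ := hx
          show bpass (a :: b :: (t ++ [c])) = _
          simp only [bpass, if_pos h]
          have : bpass (a :: (t ++ [c])) = if c < m then zs' ++ [c, m] else zs' ++ [m, c] := by
            rw [show a :: (t ++ [c]) = (a :: t) ++ [c] by simp]
            exact ih c zs' m hx2
          rw [this]
          split <;> simp
  | case4 a b t h ih =>
      intro c zs m hx
      simp only [bpass, if_neg h] at hx
      have hne : bpass (b :: t) ≠ [] := bpass_ne_nil _ (by simp)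
      cases zs with
      | nil =>
          simp at hx
          exact absurd hx.2 hne
      | cons z zs' =>
          simp at hx
          obtain ⟨rfl, hx2⟩ := hx
          show bpass (a :: b :: (t ++ [c])) = _
          simp only [bpass, if_neg h]
          have : bpass (b :: (t ++ [c])) = if c < m then zs' ++ [c, m] else zs' ++ [m, c] := by
            rw [show b :: (t ++ [c]) = (b :: t) ++ [c] by simp]
            exact ih c zs' m hx2
          rw [this]
          split <;> simp

-- the last element of bpass dominates the list
theorem bpass_last_max : ∀ (xs zs : List Int) (m : Int),
    bpass xs = zs ++ [m] → ∀ x ∈ xs, x ≤ m := by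
  intro xs
  induction xs using bpass.induct with
  | case1 => intro zs m h x hx; simp at hx
  | case2 a =>
      intro zs m h x hx
      simp [bpass] at h
      have : a = m := by
        cases zs with
        | nil => simpa using h
        | cons z t => simp at h
      simp at hx; omega
  | case3 a b t h ih =>
      intro zs m hx x hmem
      simp only [bpass, if_pos h] at hx
      have hne : bpass (a :: t) ≠ [] := bpass_ne_nil _ (by simp)
      cases zs with
      | nil => simp at hx; exact absurd hx.2 hne
      | cons z zs' =>
          simp at hx
          obtain ⟨rfl, hx2⟩ := hx
          have hall := ih zs' m hx2
          have ham : a ≤ m := hall a (by simp)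
          simp at hmem
          rcases hmem with rfl | rfl | hmem
          · exact ham
          · omega
          · exact hall x (by simp [hmem])
  | case4 a b t h ih =>
      intro zs m hx x hmem
      simp only [bpass, if_neg h] at hx
      have hne : bpass (b :: t) ≠ [] := bpass_ne_nil _ (by simp)
      cases zs with
      | nil => simp at hx; exact absurd hx.2 hne
      | cons z zs' =>
          simp at hx
          obtain ⟨rfl, hx2⟩ := hx
          have hall := ih zs' m hx2
          have hbm : b ≤ m := hall b (by simp)
          simp at hmem
          rcases hmem with rfl | rfl | hmem
          · omega
          · exact hbm
          · exact hall x (by simp [hmem])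

theorem bpass_append_max (ys : List Int) (m : Int) (h : ∀ x ∈ ys, x ≤ m) :
    bpass (ys ++ [m]) = bpass ys ++ [m] := by
  cases ys with
  | nil => simp [bpass]
  | cons y t =>
      obtain ⟨zs, m', hz⟩ : ∃ zs m', bpass (y :: t) = zs ++ [m'] := by
        rcases List.eq_nil_or_concat (bpass (y :: t)) with hn | ⟨zs, m', h⟩
        · exact absurd hn (bpass_ne_nil _ (by simp))
        · exact ⟨zs, m', by simpa using h⟩
      have hm' : m' ≤ m := by
        have : m' ∈ bpass (y :: t) := by rw [hz]; simp
        exact h m' ((bpass_perm _).mem_iff.mp this)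
      rw [bpass_snoc _ m zs m' hz, hz, if_neg (by omega)]
      simp

theorem bpass_iter_perm : ∀ (n : Nat) (l : List Int), (bpass^[n] l).Perm l := by
  intro n
  induction n with
  | zero => intro l; simp
  | succ k ih =>
      intro l
      rw [Function.iterate_succ_apply]
      exact (ih (bpass l)).trans (bpass_perm l)

theorem bpass_iter_append_max : ∀ (n : Nat) (ys : List Int) (m : Int),
    (∀ x ∈ ys, x ≤ m) → bpass^[n] (ys ++ [m]) = bpass^[n] ys ++ [m] := by
  intro n
  induction n with
  | zero => intro ys m h; simp
  | succ k ih =>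
      intro ys m h
      rw [Function.iterate_succ_apply, Function.iterate_succ_apply,
        bpass_append_max ys m h]
      exact ih (bpass ys) m (fun x hx => h x ((bpass_perm ys).mem_iff.mp hx))

theorem bpass_iter_sorted : ∀ (n : Nat) (l : List Int), l.length ≤ n →
    (bpass^[n] l).Pairwise (· ≤ ·) := by
  intro n
  induction n with
  | zero =>
      intro l h
      have : l = [] := List.eq_nil_of_length_eq_zero (by omega)
      simp [this]
  | succ k ih =>
      intro l h
      cases l with
      | nil =>
          rw [Function.iterate_succ_apply, show bpass ([] : List Int) = [] from by simp [bpass]]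
          exact ih [] (by simp)
      | cons y t =>
          rw [Function.iterate_succ_apply]
          obtain ⟨zs, m, hz⟩ : ∃ zs m, bpass (y :: t) = zs ++ [m] := by
            rcases List.eq_nil_or_concat (bpass (y :: t)) with hn | ⟨zs, m, hh⟩
            · exact absurd hn (bpass_ne_nil _ (by simp))
            · exact ⟨zs, m, by simpa using hh⟩
          have hmax : ∀ x ∈ zs, x ≤ m := by
            intro x hx
            exact bpass_last_max _ zs m hz x
              ((bpass_perm (y :: t)).mem_iff.mp (by rw [hz]; simp [hx]))
          have hlen : zs.length ≤ k := by
            have := (bpass_perm (y :: t)).length_eq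
            rw [hz] at this; simp at this h ⊢; omega
          rw [hz, bpass_iter_append_max k zs m hmax]
          rw [List.pairwise_append]
          refine ⟨ih zs hlen, by simp, ?_⟩
          intro x hx y' hy'
          simp at hy'; subst hy'
          exact hmax x ((bpass_iter_perm k zs).mem_iff.mp hx)

theorem getD_append_cons (zs : List Int) (y : Int) (rest : List Int) :
    (zs ++ y :: rest).getD zs.length 0 = y := by
  simp [List.getD_eq_getElem?_getD]

theorem getD_append_cons_cons (zs : List Int) (y d : Int) (rest : List Int) :
    (zs ++ y :: d :: rest).getD (zs.length + 1) 0 = d := by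
  induction zs with
  | nil => simp
  | cons z t ih => simp

theorem set_append_cons (zs : List Int) (y : Int) (rest : List Int) (v : Int) :
    (zs ++ y :: rest).set zs.length v = zs ++ v :: rest := by
  induction zs with
  | nil => simp
  | cons z t ih => simp [ih]

theorem set_append_cons_cons (zs : List Int) (y d : Int) (rest : List Int) (v : Int) :
    (zs ++ y :: d :: rest).set (zs.length + 1) v = zs ++ y :: v :: rest := by
  induction zs with
  | nil => simp
  | cons z t ih => simp [ih]

-- pvBubbleStep at position |zs| of zs ++ m :: d :: rest
theorem step_at (zs : List Int) (m d : Int) (rest : List Int) :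
    pvBubbleStep (zs ++ m :: d :: rest) (zs.length : Int)
      = if d < m then zs ++ d :: m :: rest else zs ++ m :: d :: rest := by
  have hc : ((zs.length : Int) + 1) = ((zs.length + 1 : Nat) : Int) := by push_cast; ring
  simp only [pvBubbleStep, hc, PySem.List.pyGetD_natCast, PySem.List.pySetD_natCast,
    getD_append_cons, getD_append_cons_cons]
  split
  · rw [set_append_cons, set_append_cons_cons]
  · rfl

-- the index-based inner loop computes bpass on the processed prefix
theorem bubble_bridge : ∀ (k : Nat) (l : List Int), k < l.length →
    (PySem.List.pyRange 0 (k : Int) 1).foldl pvBubbleStep l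
      = bpass (l.take (k + 1)) ++ l.drop (k + 1) := by
  intro k
  induction k with
  | zero =>
      intro l h
      rw [PySem.List.pyRange_one_eq_nil (by omega)]
      cases l with
      | nil => simp at h
      | cons x t => simp [bpass]
  | succ k ih =>
      intro l h
      have hcast : ((k + 1 : Nat) : Int) = (k : Int) + 1 := by push_cast; ring
      rw [hcast, PySem.List.pyRange_one_succ_right (by omega), List.foldl_append]
      rw [ih l (by omega)]
      set T := l.take (k + 1) with hT
      have hTlen : T.length = k + 1 := by simp [hT]; omega
      have hTne : T ≠ [] := by intro hn; rw [hn] at hTlen; simp at hTlen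
      obtain ⟨zs, m, hz⟩ : ∃ zs m, bpass T = zs ++ [m] := by
        rcases List.eq_nil_or_concat (bpass T) with hn | ⟨zs, m, hh⟩
        · exact absurd hn (bpass_ne_nil T hTne)
        · exact ⟨zs, m, by simpa using hh⟩
      have hzlen : zs.length = k := by
        have := (bpass_perm T).length_eq
        rw [hz, hTlen] at this
        simp at this
        omega
      have hd : l.drop (k + 1) = l[k + 1] :: l.drop (k + 1 + 1) := by
        rw [List.drop_eq_getElem_cons h]
      rw [hz, hd]
      have hflat : zs ++ [m] ++ l[k + 1] :: l.drop (k + 1 + 1)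
          = zs ++ m :: l[k + 1] :: l.drop (k + 1 + 1) := by simp
      rw [hflat, show ((k : Int)) = ((zs.length : Nat) : Int) by rw [hzlen]]
      simp only [List.foldl_cons, List.foldl_nil]
      rw [step_at]
      have hT2 : l.take (k + 1 + 1) = T ++ [l[k + 1]] := by
        rw [hT, List.take_add_one, List.getElem?_eq_getElem h]
        rfl
      rw [hT2, bpass_snoc T (l[k + 1]) zs m hz]
      split <;> simp

theorem bubblePass_eq_bpass (l : List Int) : pvBubblePass l = bpass l := by
  unfold pvBubblePass
  cases l with
  | nil =>
      rw [PySem.List.pyRange_one_eq_nil (by simp)]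
      simp [bpass]
  | cons x t =>
      have hlen : PySem.List.len (x :: t) - 1 = ((t.length : Nat) : Int) := by
        simp [PySem.List.len_eq]
      rw [hlen, bubble_bridge t.length (x :: t) (by simp)]
      simp

theorem foldl_ignore_iterate {α β : Type} (f : α → α) :
    ∀ (r : List β) (init : α), r.foldl (fun cur _ => f cur) init = f^[r.length] init := by
  intro r
  induction r with
  | nil => intro init; rfl
  | cons x t ih =>
      intro init
      simp only [List.foldl_cons, List.length_cons, ih, Function.iterate_succ_apply]

theorem bubbleSort_eq_iter (l : List Int) : pvBubbleSort l = bpass^[l.length] l := by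
  unfold pvBubbleSort
  have hfun : (fun (cur : List Int) (_ : Int) => pvBubblePass cur)
      = fun cur _ => bpass cur := by
    funext cur j; exact bubblePass_eq_bpass cur
  rw [hfun, foldl_ignore_iterate bpass]
  congr 1
  simp [PySem.List.length_pyRange_one, PySem.List.len_eq]

-- bubble-sorting the filtered list equals filtering the sorted list
theorem bubbleSort_filter (q : Int → Bool) (arr : List Int) :
    pvBubbleSort (arr.filter q) = (PySem.List.sorted arr (fun x => x) false).filter q := by
  set L := arr.filter q with hL
  have p1 : (pvBubbleSort L).Perm L := by rw [bubbleSort_eq_iter]; exact bpass_iter_perm _ _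
  have s1 : (pvBubbleSort L).Pairwise (· ≤ ·) := by
    rw [bubbleSort_eq_iter]; exact bpass_iter_sorted _ _ (le_refl _)
  have p2 : ((PySem.List.sorted arr (fun x => x) false).filter q).Perm L :=
    (PySem.List.sorted_perm arr (fun x => x) false).filter q
  have s2 : ((PySem.List.sorted arr (fun x => x) false).filter q).Pairwise (· ≤ ·) := by
    have := PySem.List.sorted_pairwise arr (fun x => x)
    exact List.Pairwise.filter q this
  exact (p1.trans p2.symm).eq_of_pairwise (fun a b _ _ h1 h2 => le_antisymm h1 h2) s1 s2

-- A's partition loop is three filters of the traversed list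
theorem foldl_loopBody : ∀ (l e o p : List Int),
    l.foldl pvLoopBody (e, o, p)
      = (e ++ l.filter (fun n => PySem.Int.mod n 2 == 0),
         o ++ l.filter (fun n => !(PySem.Int.mod n 2 == 0)),
         p ++ l.filter (fun n => if PySem.Int.mod n 2 == 0 then n == 2 else pvCheckPrime n)) := by
  intro l
  induction l with
  | nil => intro e o p; simp
  | cons x t ih =>
      intro e o p
      simp only [List.foldl_cons, List.filter_cons]
      by_cases hx : PySem.Int.mod x 2 == 0
      · simp only [pvLoopBody, hx, if_pos]
        by_cases h2 : x == (2 : Int)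
        · simp [ih, h2]
        · simp [ih, h2]
      · simp only [pvLoopBody, hx]
        by_cases hp : pvCheckPrime x
        · simp [ih, hp]
        · simp [ih, hp]

-- on even numbers, trial-division primality is exactly "= 2"
theorem checkPrime_even (n : Int) (h : PySem.Int.mod n 2 == 0) :
    pvCheckPrime n = (n == 2) := by
  unfold pvCheckPrime
  by_cases h1 : n ≤ 1
  · rw [if_pos h1]
    have : ¬ n = 2 := by omega
    simp [this]
  · rw [if_neg h1]
    by_cases h2 : n = 2
    · subst h2
      rw [PySem.List.pyRange_one_eq_nil (by omega)]
      simp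
    · have h3 : (3:Int) ≤ n := by omega
      have hmem : (2:Int) ∈ PySem.List.pyRange 2 n 1 :=
        (PySem.List.mem_pyRange_one).mpr ⟨le_refl _, by omega⟩
      have : ¬ (PySem.List.pyRange 2 n 1).all (fun i => !(PySem.Int.mod n i == 0)) = true := by
        intro hall
        have h4 := List.all_eq_true.mp hall 2 hmem
        simp [PySem.Int.mod] at h4 h
        omega
      simp only [Bool.not_eq_true] at this
      simp [this, h2]

-- the early-exit loop computes the same as the range-all form
theorem checkPrimeLoop_eq_all : ∀ (num i : Int),
    pvCheckPrimeLoop num i = (PySem.List.pyRange i num 1).all (fun j => !(PySem.Int.mod num j == 0)) := by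
  intro num i
  induction i using pvCheckPrimeLoop.induct num with
  | case1 i h hd =>
      rw [pvCheckPrimeLoop, if_pos h, if_pos hd, PySem.List.pyRange_one_cons h]
      simp [hd]
  | case2 i h hd ih =>
      rw [pvCheckPrimeLoop, if_pos h, if_neg hd, PySem.List.pyRange_one_cons h, ih]
      simp [hd]
  | case3 i h =>
      rw [pvCheckPrimeLoop, if_neg h, PySem.List.pyRange_one_eq_nil (by omega)]
      simp

theorem checkPrimeB_eq (n : Int) : pvCheckPrimeB n = pvCheckPrime n := by
  unfold pvCheckPrimeB pvCheckPrime
  by_cases h : n ≤ 1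
  · simp [h]
  · simp only [if_neg h]
    exact checkPrimeLoop_eq_all n 2

-- A's prime condition coincides with B's plain check_prime
theorem primeCond_eq (n : Int) :
    (if PySem.Int.mod n 2 == 0 then n == 2 else pvCheckPrime n) = pvCheckPrimeB n := by
  by_cases h : PySem.Int.mod n 2 == 0
  · rw [if_pos h, ← checkPrime_even n h, checkPrimeB_eq]
  · rw [if_neg h, checkPrimeB_eq]

-- ===== VERDICT (by name: the statement is the Claim_ definition above) =====
theorem segregate_and_sort_spec : Claim_equal_segregate_and_sort := by
  intro arr _
  unfold Spec_segregate_and_sort segregate_and_sort segregate_and_sort_alt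
  rw [foldl_loopBody]
  simp only [List.nil_append]
  rw [bubbleSort_filter, bubbleSort_filter, bubbleSort_filter]
  have : (fun n => if PySem.Int.mod n 2 == 0 then n == (2:Int) else pvCheckPrime n)
      = fun n => pvCheckPrimeB n := funext primeCond_eq
  rw [this]
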